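-- pv_equiv track=rewrite | github.com/pypi-data/pypi-mirror-401 | packages/devcovenant/devcovenant-0.2.5-py3-none-any.whl/devcovenant/core/policy_scripts/docstring_and_comment_coverage.py | _has_comment_before
-- ===== SOURCE A (Python) =====
-- from typing import Set
--
-- def _has_comment_before(
--     line: int, comment_lines: Set[int], lookback: int = 3
-- ) -> bool:
--     """Check whether a comment exists in the lines immediately preceding
--     the given line."""
--     for offset in range(lookback + 1):
--         target = line - offset
--         if target <= 0:
--             continue
--         if target in comment_lines:
--             return True
--     return False
-- ===== SOURCE B (Python) =====
-- def _has_comment_before(line, comment_lines, lookback=3):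
--     """Check whether a comment exists in the lines immediately preceding
--     the given line."""
--     # Scan the comment set once, testing each comment line against the
--     # window bounds; no per-offset membership lookups.
--     lo = line - lookback
--     return any(lo <= c <= line and c > 0 for c in comment_lines)
-- ===== Notes on version B (the rewrite author's own statement) =====
-- stated objective: alternative
-- what changed: Inverts the traversal: instead of looping over offsets in the lookback window and doing a set-membership lookup for each, B scans the comment set once and tests each element against the window bounds arithmetically, so no membership test into the set remains; cost is O(|comment_lines|) instead of O(lookback).
import Mathlib
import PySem

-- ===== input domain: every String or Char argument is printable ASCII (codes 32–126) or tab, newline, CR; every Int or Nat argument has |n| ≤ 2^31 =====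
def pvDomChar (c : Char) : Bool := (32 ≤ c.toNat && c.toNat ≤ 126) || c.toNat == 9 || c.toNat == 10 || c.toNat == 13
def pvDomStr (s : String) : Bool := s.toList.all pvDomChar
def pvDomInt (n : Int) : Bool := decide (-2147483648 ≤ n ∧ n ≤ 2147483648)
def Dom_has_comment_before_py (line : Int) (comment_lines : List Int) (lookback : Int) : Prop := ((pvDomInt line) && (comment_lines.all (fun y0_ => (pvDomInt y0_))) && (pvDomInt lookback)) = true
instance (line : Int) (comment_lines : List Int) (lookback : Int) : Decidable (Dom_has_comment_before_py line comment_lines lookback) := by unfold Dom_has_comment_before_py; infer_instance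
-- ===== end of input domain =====

-- B inverts the traversal: it scans the comment set once and tests each element against the window bounds, instead of looping over window offsets with set lookups (alternative; same result).
-- ===== PORT A =====
-- literal port of A: loop over range(lookback+1) with continue on target <= 0 and early return on membership
def has_comment_before_py (line : Int) (comment_lines : List Int) (lookback : Int) : Bool :=
  (PySem.List.pyRange 0 (lookback + 1) 1).any (fun offset =>
    let target := line - offset
    if target ≤ 0 then false else comment_lines.contains target)

-- ===== PORT B =====
-- port of B: any(lo <= c <= line and c > 0 for c in comment_lines), lo = line - lookback
def has_comment_before_py_alt (line : Int) (comment_lines : List Int) (lookback : Int) : Bool :=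
  let lo := line - lookback
  comment_lines.any (fun c => decide (lo ≤ c) && decide (c ≤ line) && decide (0 < c))

-- ===== PRECONDITION & SPEC =====
def Spec_has_comment_before_py (line : Int) (comment_lines : List Int) (lookback : Int) (out : Bool) : Prop := out = has_comment_before_py_alt line comment_lines lookback
instance (line : Int) (comment_lines : List Int) (lookback : Int) (out : Bool) : Decidable (Spec_has_comment_before_py line comment_lines lookback out) := by unfold Spec_has_comment_before_py; infer_instance

-- ===== CLAIM =====
def Claim_equal_has_comment_before_py : Prop := ∀ (line : Int) (comment_lines : List Int) (lookback : Int), Dom_has_comment_before_py line comment_lines lookback → Spec_has_comment_before_py line comment_lines lookback (has_comment_before_py line comment_lines lookback)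

-- ===== LEMMAS AND PROOFS =====

-- ===== VERDICT =====
theorem has_comment_before_py_spec : Claim_equal_has_comment_before_py := by
  intro line comment_lines lookback _
  unfold Spec_has_comment_before_py has_comment_before_py has_comment_before_py_alt
  rw [Bool.eq_iff_iff]
  simp only [List.any_eq_true, PySem.List.mem_pyRange_one, Bool.and_eq_true, decide_eq_true_eq,
    List.contains_eq_mem]
  constructor
  · rintro ⟨offset, ⟨h0, h1⟩, hc⟩
    by_cases hpos : line - offset ≤ 0
    · rw [if_pos hpos] at hc
      exact absurd hc Bool.false_ne_true
    · rw [if_neg hpos] at hc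
      simp only [decide_eq_true_eq] at hc
      exact ⟨line - offset, hc, ⟨by omega, by omega⟩, by omega⟩
  · rintro ⟨c, hm, ⟨h1, h2⟩, h3⟩
    refine ⟨line - c, ⟨by omega, by omega⟩, ?_⟩
    rw [if_neg (by omega : ¬ line - (line - c) ≤ 0)]
    simp only [decide_eq_true_eq]
    have hcc : line - (line - c) = c := by omega
    rw [hcc]; exact hm
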